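-- pv_equiv track=rewrite | github.com/dfjmsf/Agent | core/project_scanner.py | _choose_entrypoint
-- ===== SOURCE A (Python) =====
-- from typing import Any, Dict, List, Optional
--
-- _ENTRYPOINT_CANDIDATES = ("app.py", "main.py", "server.py", "manage.py", "run.py")
--
-- def _choose_entrypoint(file_tree: List[str]) -> str:
--     lower_map = {path.lower(): path for path in file_tree}
--     for candidate in _ENTRYPOINT_CANDIDATES:
--         if candidate in lower_map:
--             return lower_map[candidate]
--     for path in file_tree:
--         if path.endswith(".py"):
--             return path
--     return ""
-- ===== SOURCE B (Python) =====
-- _ENTRYPOINT_CANDIDATES = ("app.py", "main.py", "server.py", "manage.py", "run.py")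
-- _PRIORITY = {name: i for i, name in enumerate(_ENTRYPOINT_CANDIDATES)}
--
-- def _choose_entrypoint(file_tree):
--     best_path = None
--     best_priority = len(_ENTRYPOINT_CANDIDATES)
--     first_py = None
--     for path in file_tree:
--         pri = _PRIORITY.get(path.lower())
--         if pri is not None and pri <= best_priority:
--             best_path, best_priority = path, pri
--         if first_py is None and path.endswith(".py"):
--             first_py = path
--     if best_path is not None:
--         return best_path
--     if first_py is not None:
--         return first_py
--     return ""
-- ===== Notes on version B (the rewrite author's own statement) =====
-- stated objective: alternative
-- what changed: Replaces A's build-a-full-lowercase dict plus two sequential scans (candidate probing, then .py search) with a single pass over file_tree maintaining best candidate path/priority (<= update reproduces dict overwrite) and the first .py path.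
import Mathlib
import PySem

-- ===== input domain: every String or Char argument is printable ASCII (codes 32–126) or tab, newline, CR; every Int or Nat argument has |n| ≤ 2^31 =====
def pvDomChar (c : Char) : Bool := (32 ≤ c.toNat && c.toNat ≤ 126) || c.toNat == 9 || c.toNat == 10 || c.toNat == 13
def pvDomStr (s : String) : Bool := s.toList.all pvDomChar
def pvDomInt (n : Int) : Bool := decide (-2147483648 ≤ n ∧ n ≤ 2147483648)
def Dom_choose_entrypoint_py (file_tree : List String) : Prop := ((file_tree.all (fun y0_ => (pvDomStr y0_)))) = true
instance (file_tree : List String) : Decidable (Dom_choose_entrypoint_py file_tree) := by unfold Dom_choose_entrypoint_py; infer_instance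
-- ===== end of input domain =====

-- B replaces the lowercase dict + two sequential scans with one pass tracking best candidate and first .py path; alternative decomposition, same cost.

-- ===== PORT A =====

def pvCandidates : List String := ["app.py", "main.py", "server.py", "manage.py", "run.py"]

-- 'for candidate in _ENTRYPOINT_CANDIDATES: if candidate in lower_map: return lower_map[candidate]'
-- ('candidate in d' then 'd[candidate]' combined as one get?: contains = get?.isSome, exact)
def pvFindCand (d : PySem.Dict String String) : List String → Option String
  | [] => none
  | c :: cs => match d.get? c with
    | some v => some v
    | none => pvFindCand d cs

-- 'for path in file_tree: if path.endswith(".py"): return path' / 'return ""'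
def pvFirstPyLoop : List String → String
  | [] => ""
  | p :: ps => if PySem.Str.endswith p ".py" then p else pvFirstPyLoop ps

def choose_entrypoint_py (file_tree : List String) : String :=
  let lower_map : PySem.Dict String String :=
    file_tree.foldl (fun d path => d.insert (PySem.Str.lower path) path) PySem.Dict.empty
  match pvFindCand lower_map pvCandidates with
  | some v => v
  | none => pvFirstPyLoop file_tree

-- ===== PORT B =====

def pvPriority : PySem.Dict String Int :=
  PySem.Dict.ofList [("app.py", 0), ("main.py", 1), ("server.py", 2), ("manage.py", 3), ("run.py", 4)]

def pvStep (st : Option String × Int × Option String) (path : String) :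
    Option String × Int × Option String :=
  let st1 := match pvPriority.get? (PySem.Str.lower path) with
    | some pri => if pri ≤ st.2.1 then (some path, pri, st.2.2) else st
    | none => st
  if st1.2.2.isNone && PySem.Str.endswith path ".py" then (st1.1, st1.2.1, some path) else st1

def choose_entrypoint_py_alt (file_tree : List String) : String :=
  let st := file_tree.foldl pvStep (none, 5, none)
  match st.1 with
  | some p => p
  | none => match st.2.2 with
    | some p => p
    | none => ""

-- ===== PRECONDITION & SPEC =====
def Spec_choose_entrypoint_py (file_tree : List String) (out : String) : Prop := out = choose_entrypoint_py_alt file_tree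
instance (file_tree : List String) (out : String) : Decidable (Spec_choose_entrypoint_py file_tree out) := by unfold Spec_choose_entrypoint_py; infer_instance

-- ===== CLAIM (what is proved, stated in full; the proofs are below) =====
def Claim_equal_choose_entrypoint_py : Prop := ∀ (file_tree : List String), Dom_choose_entrypoint_py file_tree → Spec_choose_entrypoint_py file_tree (choose_entrypoint_py file_tree)

-- ===== LEMMAS AND PROOFS =====

-- last path in xs whose lowercase equals c
def pvLastFor (xs : List String) (c : String) : Option String :=
  (xs.filter (fun p => PySem.Str.lower p == c)).getLast?

-- first path in xs ending in ".py"
def pvFirstPy (xs : List String) : Option String :=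
  (xs.filter (fun p => PySem.Str.endswith p ".py")).head?

theorem pvLastFor_append (xs : List String) (x c : String) :
    pvLastFor (xs ++ [x]) c =
      if PySem.Str.lower x == c then some x else pvLastFor xs c := by
  simp [pvLastFor, List.filter_append]
  split_ifs <;> simp

theorem pvFirstPy_append (xs : List String) (x : String) :
    pvFirstPy (xs ++ [x]) =
      (pvFirstPy xs).or (if PySem.Str.endswith x ".py" then some x else none) := by
  simp [pvFirstPy, List.filter_append]
  split_ifs with h <;> cases (xs.filter (fun p => PySem.Str.endswith p ".py")).head? <;> simp

-- the dict A builds maps each lowercase key to the LAST path with that lowercase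
theorem pvDict_get? (xs : List String) (c : String) :
    (xs.foldl (fun d path => d.insert (PySem.Str.lower path) path) PySem.Dict.empty).get? c
      = pvLastFor xs c := by
  induction xs using List.reverseRecOn with
  | nil => simp [pvLastFor]
  | append_singleton xs x ih =>
      rw [List.foldl_append, List.foldl_cons, List.foldl_nil,
        PySem.Dict.get?_insert, pvLastFor_append]
      split_ifs with h1 h2 <;> simp_all

def pvBestIdx (xs : List String) : Int :=
  if (pvLastFor xs "app.py").isSome then 0
  else if (pvLastFor xs "main.py").isSome then 1
  else if (pvLastFor xs "server.py").isSome then 2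
  else if (pvLastFor xs "manage.py").isSome then 3
  else if (pvLastFor xs "run.py").isSome then 4
  else 5

def pvBest (xs : List String) : Option String :=
  ((((pvLastFor xs "app.py").or (pvLastFor xs "main.py")).or
    (pvLastFor xs "server.py")).or (pvLastFor xs "manage.py")).or (pvLastFor xs "run.py")

theorem pvPriority_get? (s : String) : pvPriority.get? s =
    if s = "app.py" then some 0 else if s = "main.py" then some (1 : Int) else if s = "server.py" then some 2
    else if s = "manage.py" then some 3 else if s = "run.py" then some 4 else none := by
  simp [pvPriority, PySem.Dict.ofList, PySem.Dict.update, PySem.Dict.get?_insert,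
    PySem.Dict.get?_empty]
  split_ifs <;> simp_all

-- B's fold state, characterised
set_option maxHeartbeats 2000000 in
theorem pvFold_eq (xs : List String) :
    xs.foldl pvStep (none, 5, none) = (pvBest xs, pvBestIdx xs, pvFirstPy xs) := by
  induction xs using List.reverseRecOn with
  | nil => simp [pvBest, pvBestIdx, pvLastFor, pvFirstPy]
  | append_singleton xs x ih =>
      rw [List.foldl_append, List.foldl_cons, List.foldl_nil, ih]
      simp only [pvStep, pvPriority_get?, pvBest, pvBestIdx, pvFirstPy_append, pvLastFor_append]
      by_cases h0 : PySem.Str.lower x = "app.py"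
      · simp only [h0, String.reduceEq, String.reduceBEq, reduceIte]
        generalize pvLastFor xs "app.py" = l0
        generalize pvLastFor xs "main.py" = l1
        generalize pvLastFor xs "server.py" = l2
        generalize pvLastFor xs "manage.py" = l3
        generalize pvLastFor xs "run.py" = l4
        generalize pvFirstPy xs = f
        cases he : PySem.Str.endswith x ".py" <;>
        rcases l0 with _ | p0 <;> rcases l1 with _ | p1 <;> rcases l2 with _ | p2 <;>
        rcases l3 with _ | p3 <;> rcases l4 with _ | p4 <;> rcases f with _ | q <;>
        simp [Option.or]
      by_cases h1 : PySem.Str.lower x = "main.py"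
      · simp only [h1, String.reduceEq, String.reduceBEq, reduceIte]
        generalize pvLastFor xs "app.py" = l0
        generalize pvLastFor xs "main.py" = l1
        generalize pvLastFor xs "server.py" = l2
        generalize pvLastFor xs "manage.py" = l3
        generalize pvLastFor xs "run.py" = l4
        generalize pvFirstPy xs = f
        cases he : PySem.Str.endswith x ".py" <;>
        rcases l0 with _ | p0 <;> rcases l1 with _ | p1 <;> rcases l2 with _ | p2 <;>
        rcases l3 with _ | p3 <;> rcases l4 with _ | p4 <;> rcases f with _ | q <;>
        simp [Option.or]
      by_cases h2 : PySem.Str.lower x = "server.py"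
      · simp only [h2, String.reduceEq, String.reduceBEq, reduceIte]
        generalize pvLastFor xs "app.py" = l0
        generalize pvLastFor xs "main.py" = l1
        generalize pvLastFor xs "server.py" = l2
        generalize pvLastFor xs "manage.py" = l3
        generalize pvLastFor xs "run.py" = l4
        generalize pvFirstPy xs = f
        cases he : PySem.Str.endswith x ".py" <;>
        rcases l0 with _ | p0 <;> rcases l1 with _ | p1 <;> rcases l2 with _ | p2 <;>
        rcases l3 with _ | p3 <;> rcases l4 with _ | p4 <;> rcases f with _ | q <;>
        simp [Option.or]
      by_cases h3 : PySem.Str.lower x = "manage.py"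
      · simp only [h3, String.reduceEq, String.reduceBEq, reduceIte]
        generalize pvLastFor xs "app.py" = l0
        generalize pvLastFor xs "main.py" = l1
        generalize pvLastFor xs "server.py" = l2
        generalize pvLastFor xs "manage.py" = l3
        generalize pvLastFor xs "run.py" = l4
        generalize pvFirstPy xs = f
        cases he : PySem.Str.endswith x ".py" <;>
        rcases l0 with _ | p0 <;> rcases l1 with _ | p1 <;> rcases l2 with _ | p2 <;>
        rcases l3 with _ | p3 <;> rcases l4 with _ | p4 <;> rcases f with _ | q <;>
        simp [Option.or]
      by_cases h4 : PySem.Str.lower x = "run.py"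
      · simp only [h4, String.reduceEq, String.reduceBEq, reduceIte]
        generalize pvLastFor xs "app.py" = l0
        generalize pvLastFor xs "main.py" = l1
        generalize pvLastFor xs "server.py" = l2
        generalize pvLastFor xs "manage.py" = l3
        generalize pvLastFor xs "run.py" = l4
        generalize pvFirstPy xs = f
        cases he : PySem.Str.endswith x ".py" <;>
        rcases l0 with _ | p0 <;> rcases l1 with _ | p1 <;> rcases l2 with _ | p2 <;>
        rcases l3 with _ | p3 <;> rcases l4 with _ | p4 <;> rcases f with _ | q <;>
        simp [Option.or]
      simp only [beq_iff_eq, if_neg h0, if_neg h1, if_neg h2, if_neg h3, if_neg h4]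
      generalize pvLastFor xs "app.py" = l0
      generalize pvLastFor xs "main.py" = l1
      generalize pvLastFor xs "server.py" = l2
      generalize pvLastFor xs "manage.py" = l3
      generalize pvLastFor xs "run.py" = l4
      generalize pvFirstPy xs = f
      cases he : PySem.Str.endswith x ".py" <;>
      rcases l0 with _ | p0 <;> rcases l1 with _ | p1 <;> rcases l2 with _ | p2 <;>
      rcases l3 with _ | p3 <;> rcases l4 with _ | p4 <;> rcases f with _ | q <;>
      simp [Option.or]


theorem pvFirstPyLoop_eq (xs : List String) :
    pvFirstPyLoop xs = (pvFirstPy xs).getD "" := by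
  induction xs with
  | nil => simp [pvFirstPyLoop, pvFirstPy]
  | cons p ps ih =>
      simp only [pvFirstPyLoop, pvFirstPy, List.filter_cons] at *
      split_ifs with h <;> simp_all

theorem pvFindCand_eq (xs : List String) :
    pvFindCand (xs.foldl (fun d path => d.insert (PySem.Str.lower path) path) PySem.Dict.empty)
      pvCandidates = pvBest xs := by
  simp only [pvFindCand, pvCandidates, pvDict_get?, pvBest]
  rcases pvLastFor xs "app.py" with _ | p0 <;>
  rcases pvLastFor xs "main.py" with _ | p1 <;>
  rcases pvLastFor xs "server.py" with _ | p2 <;>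
  rcases pvLastFor xs "manage.py" with _ | p3 <;>
  rcases pvLastFor xs "run.py" with _ | p4 <;>
  simp [Option.or]

theorem choose_entrypoint_py_spec : Claim_equal_choose_entrypoint_py := by
  intro file_tree _
  unfold Spec_choose_entrypoint_py choose_entrypoint_py choose_entrypoint_py_alt
  rw [pvFold_eq]
  dsimp only
  rw [pvFindCand_eq]
  cases pvBest file_tree <;> cases h : pvFirstPy file_tree <;>
    simp [pvFirstPyLoop_eq, h]
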